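-- pv_equiv track=rewrite | github.com/kaiserm99/bachelorproject | sheet01/Exercise_01_02/helping_stable.py | write_rules
-- ===== SOURCE A (Python) =====
-- def write_rules(lst : list, op, atom_start="", atom_end="", wrapper_op=""):
--     count = len(lst)
--     written = ""
--
--     if wrapper_op != "":
--         written += wrapper_op + "("
--
--     if count == 0:
--         written += "BOT"
--
--     elif count == 1:
--         written += "{1}{0}{2}".format(lst[0], atom_start, atom_end)
--
--     elif count == 2:
--         written += "{0}({3}{1}{4}, {3}{2}{4})".format(op, lst[0], lst[1], atom_start, atom_end)
--
--     else:
--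
--         written += "{0}({2}{1}{3}".format(op, lst[0], atom_start, atom_end)
--
--         bracket_count = 0
--         for n, body in enumerate(lst[1:]):
--
--             if count - n == 3:
--                 written += ", {0}({3}{1}{4}, {3}{2}{4}{5}".format(op, lst[-2], lst[-1], atom_start, atom_end, ")" * (bracket_count+2))
--                 break
--
--             written += ", {0}({2}{1}{3}".format(op, body, atom_start, atom_end)
--             bracket_count += 1
--
--     if wrapper_op != "":
--         written += ")"
--
--     return written
-- ===== SOURCE B (Python) =====
-- def write_rules(lst, op, atom_start="", atom_end="", wrapper_op=""):
--     n = len(lst)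
--     if n == 0:
--         core = "BOT"
--     elif n == 1:
--         core = atom_start + lst[0] + atom_end
--     else:
--         atoms = [atom_start + x + atom_end for x in lst]
--         middles = "".join(op + "(" + a + ", " for a in atoms[:-1])
--         core = middles + atoms[-1] + ")" * (n - 1)
--     if wrapper_op != "":
--         return wrapper_op + "(" + core + ")"
--     return core
-- ===== Notes on version B (the rewrite author's own statement) =====
-- stated objective: alternative
-- what changed: Replaced A's enumerate loop with manual bracket_count bookkeeping, a break condition on count-n and negative indexing for the final pair by a flat closed-form construction: map every element to its atom-wrapped form, join 'op(atom, ' prefixes over all but the last atom, then append the last atom and a single run of n-1 closing parentheses.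
import Mathlib
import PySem

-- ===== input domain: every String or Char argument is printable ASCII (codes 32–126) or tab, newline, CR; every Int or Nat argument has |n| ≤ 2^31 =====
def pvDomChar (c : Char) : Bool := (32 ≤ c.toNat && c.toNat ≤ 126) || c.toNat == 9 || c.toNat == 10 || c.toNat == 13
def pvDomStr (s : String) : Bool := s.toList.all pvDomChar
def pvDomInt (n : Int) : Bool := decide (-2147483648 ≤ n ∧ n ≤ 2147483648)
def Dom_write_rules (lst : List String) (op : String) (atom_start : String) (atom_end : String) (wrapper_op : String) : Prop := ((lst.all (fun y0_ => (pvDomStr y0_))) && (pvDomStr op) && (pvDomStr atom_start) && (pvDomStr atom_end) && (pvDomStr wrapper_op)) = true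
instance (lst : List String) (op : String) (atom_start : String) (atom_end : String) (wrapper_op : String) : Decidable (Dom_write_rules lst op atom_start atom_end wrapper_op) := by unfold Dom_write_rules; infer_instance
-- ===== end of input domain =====

-- B replaces A's enumerate loop with bracket_count bookkeeping by a flat closed-form
-- construction: join of 'op(atom, ' prefixes, last atom, one run of closing parens
-- (objective: alternative, same cost).


-- ===== PORT A =====
-- ")" * k
def pvClose : Nat → String
  | 0 => ""
  | k + 1 => ")" ++ pvClose k

-- the 'for n, body in enumerate(lst[1:]): … break' loop of A, appending to 'written'
def writeRulesLoop (lst : List String) (op : String) (atom_start : String)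
    (atom_end : String) (count : Int) (n : Nat) (bracket_count : Nat)
    (rest : List String) (written : String) : String :=
  match rest with
  | [] => written
  | body :: tl =>
    if count - (n : Int) == 3 then
      -- lst[-2] / lst[-1]; in-range here in Python, so getD "" is never the default
      written ++ ", " ++ op ++ "(" ++ atom_start ++ ((PySem.List.pyGet? lst (-2)).getD "") ++ atom_end
        ++ ", " ++ atom_start ++ ((PySem.List.pyGet? lst (-1)).getD "") ++ atom_end
        ++ pvClose (bracket_count + 2)
    else
      writeRulesLoop lst op atom_start atom_end count (n + 1) (bracket_count + 1) tl
        (written ++ ", " ++ op ++ "(" ++ atom_start ++ body ++ atom_end)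

def write_rules (lst : List String) (op : String) (atom_start : String) (atom_end : String) (wrapper_op : String) : String :=
  let count : Int := lst.length
  let written : String := ""
  let written := if wrapper_op ≠ "" then written ++ wrapper_op ++ "(" else written
  let written :=
    if count == 0 then written ++ "BOT"
    else if count == 1 then
      written ++ atom_start ++ ((PySem.List.pyGet? lst 0).getD "") ++ atom_end
    else if count == 2 then
      written ++ op ++ "(" ++ atom_start ++ ((PySem.List.pyGet? lst 0).getD "") ++ atom_end
        ++ ", " ++ atom_start ++ ((PySem.List.pyGet? lst 1).getD "") ++ atom_end ++ ")"
    else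
      writeRulesLoop lst op atom_start atom_end count 0 0 (lst.drop 1)
        (written ++ op ++ "(" ++ atom_start ++ ((PySem.List.pyGet? lst 0).getD "") ++ atom_end)
  if wrapper_op ≠ "" then written ++ ")" else written

-- ===== PORT B =====
def write_rules_alt (lst : List String) (op : String) (atom_start : String) (atom_end : String) (wrapper_op : String) : String :=
  let n := lst.length
  let core :=
    if n == 0 then "BOT"
    else if n == 1 then atom_start ++ ((PySem.List.pyGet? lst 0).getD "") ++ atom_end
    else
      let atoms := lst.map (fun x => atom_start ++ x ++ atom_end)
      let middles := String.join (atoms.dropLast.map (fun a => op ++ "(" ++ a ++ ", "))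
      middles ++ ((PySem.List.pyGet? atoms (-1)).getD "") ++ pvClose (n - 1)
  if wrapper_op ≠ "" then wrapper_op ++ "(" ++ core ++ ")" else core

-- ===== PRECONDITION & SPEC =====
def Spec_write_rules (lst : List String) (op : String) (atom_start : String) (atom_end : String) (wrapper_op : String) (out : String) : Prop := out = write_rules_alt lst op atom_start atom_end wrapper_op
instance (lst : List String) (op : String) (atom_start : String) (atom_end : String) (wrapper_op : String) (out : String) : Decidable (Spec_write_rules lst op atom_start atom_end wrapper_op out) := by unfold Spec_write_rules; infer_instance

-- ===== CLAIM (what is proved, stated in full; the proofs are below) =====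
def Claim_equal_write_rules : Prop := ∀ (lst : List String) (op : String) (atom_start : String) (atom_end : String) (wrapper_op : String), Dom_write_rules lst op atom_start atom_end wrapper_op → Spec_write_rules lst op atom_start atom_end wrapper_op (write_rules lst op atom_start atom_end wrapper_op)

-- ===== LEMMAS AND PROOFS =====

-- proof-side helper: the right-nested core string (A's loop and B's flat join both build it)
def coreAlt (op : String) (atom_start : String) (atom_end : String) : List String → String
  | [] => "BOT"
  | [a] => atom_start ++ a ++ atom_end
  | [a, b] => op ++ "(" ++ atom_start ++ a ++ atom_end ++ ", " ++ atom_start ++ b ++ atom_end ++ ")"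
  | a :: rest => op ++ "(" ++ atom_start ++ a ++ atom_end ++ ", " ++ coreAlt op atom_start atom_end rest ++ ")"

theorem foldl_acc : ∀ (l : List String) (a : String),
    List.foldl (fun r s => r ++ s) a l = a ++ List.foldl (fun r s => r ++ s) "" l := by
  intro l
  induction l with
  | nil => intro a; simp [List.foldl]
  | cons x xs ih =>
    intro a
    simp only [List.foldl]
    rw [ih (a ++ x), ih ("" ++ x)]
    simp [String.append_assoc]

theorem join_cons (x : String) (l : List String) :
    List.foldl (fun r s => r ++ s) "" (x :: l) = x ++ List.foldl (fun r s => r ++ s) "" l := by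
  simp only [List.foldl]
  rw [foldl_acc l ("" ++ x)]
  simp

theorem pvClose_snoc (k : Nat) : pvClose (k + 1) = pvClose k ++ ")" := by
  induction k with
  | zero => rfl
  | succ k ih =>
    show ")" ++ pvClose (k + 1) = ")" ++ pvClose k ++ ")"
    rw [ih, String.append_assoc]

-- B's flat join-based construction equals the nested core, for lists of length ≥ 2
theorem coreAlt_eq_flat (op as ae : String) :
    ∀ (lst : List String), 2 ≤ lst.length →
      coreAlt op as ae lst
        = String.join (((lst.map (fun x => as ++ x ++ ae)).dropLast).map
            (fun a => op ++ "(" ++ a ++ ", "))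
          ++ (((lst.map (fun x => as ++ x ++ ae)).getLast?).getD "")
          ++ pvClose (lst.length - 1) := by
  intro lst
  induction lst with
  | nil => intro h; simp at h
  | cons a tl ih =>
    intro h
    cases tl with
    | nil => simp at h
    | cons b tl2 =>
      cases tl2 with
      | nil =>
        simp only [coreAlt, List.map, List.dropLast, List.getLast?, String.join, List.foldl,
          List.length_cons, List.length_nil, Option.getD_some, pvClose]
        simp [String.append_assoc]
      | cons c tl' =>
        have hrec := ih (by simp)
        show coreAlt op as ae (a :: b :: c :: tl') = _
        rw [show coreAlt op as ae (a :: b :: c :: tl')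
              = op ++ "(" ++ as ++ a ++ ae ++ ", " ++ coreAlt op as ae (b :: c :: tl') ++ ")" from rfl]
        rw [hrec]
        simp only [List.map_cons, List.getLast?_cons_cons, List.length_cons, String.join]
        rw [show ((as ++ a ++ ae) :: (as ++ b ++ ae) :: (as ++ c ++ ae)
              :: List.map (fun x => as ++ x ++ ae) tl').dropLast
            = (as ++ a ++ ae) :: ((as ++ b ++ ae) :: (as ++ c ++ ae)
              :: List.map (fun x => as ++ x ++ ae) tl').dropLast from rfl]
        rw [show tl'.length + 1 + 1 + 1 - 1 = (tl'.length + 1 + 1 - 1) + 1 by omega, pvClose_snoc]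
        rw [List.map_cons, join_cons]
        simp [String.append_assoc]

-- A's loop, started at position n with xs = lst.drop (n+1) still to process (xs.length >= 2),
-- appends exactly ", " ++ the nested core of xs ++ (bracket_count+1) closing parens.
theorem writeRulesLoop_eq (lst : List String) (op as ae : String) :
    ∀ (xs : List String) (n bc : Nat) (w : String),
      xs = lst.drop (n + 1) → 2 ≤ xs.length →
      writeRulesLoop lst op as ae (lst.length : Int) n bc xs w
        = w ++ ", " ++ coreAlt op as ae xs ++ pvClose (bc + 1) := by
  intro xs
  induction xs with
  | nil => intro n bc w _ h2; simp at h2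
  | cons a tl ih =>
    intro n bc w hdrop h2
    have hlen : tl.length + 1 = lst.length - (n + 1) := by
      have h := congrArg List.length hdrop
      simp only [List.length_cons, List.length_drop] at h
      omega
    have hn : n + 1 < lst.length := by omega
    cases tl with
    | nil => simp at h2
    | cons b tl2 =>
      cases tl2 with
      | nil =>
        -- base case of the loop: count - n == 3
        simp only [List.length_cons, List.length_nil] at hlen
        have hL : lst.length = n + 3 := by omega
        have hc : ((lst.length : Int) - (n : Int) == 3) = true := by
          rw [beq_iff_eq]; omega
        have hget2 : PySem.List.pyGet? lst (-2) = some a := by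
          rw [PySem.List.pyGet?_neg_ofNat lst 2 (by omega) (by omega)]
          have he : lst[lst.length - 2]? = (lst.drop (n+1))[0]? := by
            rw [List.getElem?_drop]; congr 1; omega
          rw [he, ← hdrop]; simp
        have hget1 : PySem.List.pyGet? lst (-1) = some b := by
          rw [PySem.List.pyGet?_neg_ofNat lst 1 (by omega) (by omega)]
          have he : lst[lst.length - 1]? = (lst.drop (n+1))[1]? := by
            rw [List.getElem?_drop]; congr 1; omega
          rw [he, ← hdrop]; simp
        rw [writeRulesLoop.eq_def]
        simp only [hc, if_true, hget2, hget1, Option.getD_some, coreAlt, pvClose]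
        simp [String.append_assoc]
      | cons c tl' =>
        -- middle element: count - n >= 4, recurse
        simp only [List.length_cons] at hlen
        have hc : ((lst.length : Int) - (n : Int) == 3) = false := by
          rw [beq_eq_false_iff_ne]; intro hx; omega
        have hdrop' : b :: c :: tl' = lst.drop (n + 1 + 1) := by
          have hd : lst.drop (n + 1 + 1) = (lst.drop (n + 1)).drop 1 := by
            rw [List.drop_drop]
          rw [hd, ← hdrop]; simp
        have hrec := ih (n + 1) (bc + 1) (w ++ ", " ++ op ++ "(" ++ as ++ a ++ ae) hdrop' (by simp)
        rw [writeRulesLoop.eq_def]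
        simp only [hc, Bool.false_eq_true, if_false]
        rw [hrec]
        show _ = w ++ ", " ++ coreAlt op as ae (a :: b :: c :: tl') ++ pvClose (bc + 1)
        simp only [coreAlt, pvClose]
        simp [String.append_assoc]

-- the count-case analysis of A, with an arbitrary already-written prefix w0
theorem write_rules_eq_core (op as ae : String) (lst : List String) (w0 : String) :
    (if ((lst.length : Int) == 0) = true then w0 ++ "BOT"
     else if ((lst.length : Int) == 1) = true then
       w0 ++ as ++ ((PySem.List.pyGet? lst 0).getD "") ++ ae
     else if ((lst.length : Int) == 2) = true then
       w0 ++ op ++ "(" ++ as ++ ((PySem.List.pyGet? lst 0).getD "") ++ ae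
         ++ ", " ++ as ++ ((PySem.List.pyGet? lst 1).getD "") ++ ae ++ ")"
     else
       writeRulesLoop lst op as ae (lst.length : Int) 0 0 (lst.drop 1)
         (w0 ++ op ++ "(" ++ as ++ ((PySem.List.pyGet? lst 0).getD "") ++ ae))
    = w0 ++ coreAlt op as ae lst := by
  match lst with
  | [] => simp [coreAlt]
  | [a] => simp [coreAlt, PySem.List.pyGet?, PySem.List.pyIdx?, String.append_assoc]
  | [a, b] => simp [coreAlt, PySem.List.pyGet?, PySem.List.pyIdx?, String.append_assoc]
  | a :: b :: c :: tl =>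
    have h0 : (((a :: b :: c :: tl).length : Int) == 0) = false := by
      rw [beq_eq_false_iff_ne]; simp; omega
    have h1 : (((a :: b :: c :: tl).length : Int) == 1) = false := by
      rw [beq_eq_false_iff_ne]; simp; omega
    have h2 : (((a :: b :: c :: tl).length : Int) == 2) = false := by
      rw [beq_eq_false_iff_ne]; simp; omega
    simp only [h0, h1, h2, Bool.false_eq_true, if_false]
    rw [show List.drop 1 (a :: b :: c :: tl) = b :: c :: tl from rfl]
    rw [writeRulesLoop_eq (a :: b :: c :: tl) op as ae (b :: c :: tl) 0 0 _ (by simp) (by simp)]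
    rw [show PySem.List.pyGet? (a :: b :: c :: tl) 0 = some a from by rw [PySem.List.pyGet?_zero]; rfl]
    show _ = w0 ++ coreAlt op as ae (a :: b :: c :: tl)
    simp only [coreAlt, pvClose, Option.getD_some]
    simp [String.append_assoc]

-- B's core expression equals coreAlt for every list
theorem alt_core_eq (op as ae : String) (lst : List String) :
    (if (lst.length == 0) = true then ("BOT" : String)
     else if (lst.length == 1) = true then as ++ ((PySem.List.pyGet? lst 0).getD "") ++ ae
     else
       String.join (((lst.map (fun x => as ++ x ++ ae)).dropLast).map
           (fun a => op ++ "(" ++ a ++ ", "))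
         ++ ((PySem.List.pyGet? (lst.map (fun x => as ++ x ++ ae)) (-1)).getD "")
         ++ pvClose (lst.length - 1))
    = coreAlt op as ae lst := by
  match lst with
  | [] => rfl
  | [a] =>
    rw [show PySem.List.pyGet? [a] 0 = some a from by rw [PySem.List.pyGet?_zero]; rfl]
    simp [coreAlt]
  | a :: b :: tl =>
    have h0 : ((a :: b :: tl).length == 0) = false := by simp
    have h1 : ((a :: b :: tl).length == 1) = false := by simp
    simp only [h0, h1, Bool.false_eq_true, if_false]
    rw [PySem.List.pyGet?_neg_one]
    rw [coreAlt_eq_flat op as ae (a :: b :: tl) (by simp)]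

-- ===== VERDICT (by name: the statement is the Claim_ definition above) =====
theorem write_rules_spec : Claim_equal_write_rules := by
  intro lst op as ae wo _
  show write_rules lst op as ae wo = write_rules_alt lst op as ae wo
  simp only [write_rules, write_rules_alt]
  rw [alt_core_eq op as ae lst]
  by_cases hw : wo = ""
  · subst hw
    simp only [ne_eq, not_true_eq_false, if_false]
    exact write_rules_eq_core op as ae lst ""
  · simp only [ne_eq, hw, not_false_eq_true, if_true]
    rw [write_rules_eq_core op as ae lst ("" ++ wo ++ "(")]
    simp [String.append_assoc]
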